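-- pv_equiv track=rewrite | github.com/Naomi391/Phase-3-Week-1-Python-Toy-Problems- | challenge3.py | solution
-- ===== SOURCE A (Python) =====
-- def solution(N):
--     # Define the alphabet
--     alphabet = 'abcdefghijklmnopqrstuvwxyz'
--
--     # Initialize the result string
--     result = ''
--
--     # Determine the number of letters needed to fill the string
--     num_letters = N // 2
--
--     # Fill the result string with pairs of letters from the alphabet
--     for i in range(num_letters):
--         result += alphabet[i % 26] * 2
--
--     # If there's an odd number of characters, add one more letter to the result
--     if N % 2 != 0:
--         result += alphabet[0]
--
--     return result
-- ===== SOURCE B (Python) =====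
-- def solution(N):
--     # Build the fixed 52-char period once and slice a repetition of it,
--     # instead of accumulating pair by pair.
--     alphabet = 'abcdefghijklmnopqrstuvwxyz'
--     period = ''.join(c + c for c in alphabet)
--     even_len = 2 * max(0, N // 2)
--     s = (period * (even_len // 52 + 1))[:even_len]
--     if N % 2 != 0:
--         s += 'a'
--     return s
-- ===== Notes on version B (the rewrite author's own statement) =====
-- stated objective: faster
-- what changed: Replaces A's per-pair accumulation loop (one iteration and one string concatenation per letter pair) by precomputing the fixed doubled-alphabet period once, repeating it enough times, slicing off the even-length prefix, and appending the odd trailing letter.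
import Mathlib
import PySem

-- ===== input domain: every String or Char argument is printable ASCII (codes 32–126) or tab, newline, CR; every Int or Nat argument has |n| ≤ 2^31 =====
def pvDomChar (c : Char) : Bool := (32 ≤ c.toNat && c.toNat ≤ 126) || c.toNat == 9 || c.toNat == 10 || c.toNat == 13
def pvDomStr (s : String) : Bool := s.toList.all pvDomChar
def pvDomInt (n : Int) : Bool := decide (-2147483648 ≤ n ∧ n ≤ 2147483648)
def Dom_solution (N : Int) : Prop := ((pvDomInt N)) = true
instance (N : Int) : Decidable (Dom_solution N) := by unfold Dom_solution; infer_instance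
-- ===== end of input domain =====

-- B replaces A's per-pair accumulation loop with "repeat the fixed doubled-alphabet period and slice";
-- objective: faster (constant-factor; the Python-level loop over the pairs disappears).


-- ===== PORT A =====
def pvAlphabet : List Char := "abcdefghijklmnopqrstuvwxyz".toList

def solution (N : Int) : String :=
  let numLetters := PySem.Int.floordiv N 2
  let result : List Char :=
    (PySem.List.pyRange 0 numLetters).foldl
      (fun r i => r ++ PySem.List.pyRepeat [PySem.List.pyGetD pvAlphabet (PySem.Int.mod i 26) 'a'] 2) []
  let result := if PySem.Int.mod N 2 ≠ 0 then result ++ [PySem.List.pyGetD pvAlphabet 0 'a'] else result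
  String.ofList result

-- ===== PORT B =====
-- period = ''.join(c + c for c in alphabet)
def pvPeriod : List Char := pvAlphabet.flatMap (fun c => [c, c])

def solution_alt (N : Int) : String :=
  let evenLen : Int := 2 * max 0 (PySem.Int.floordiv N 2)
  let s := PySem.List.slice (PySem.List.pyRepeat pvPeriod (PySem.Int.floordiv evenLen 52 + 1)) none (some evenLen)
  let s := if PySem.Int.mod N 2 ≠ 0 then s ++ ['a'] else s
  String.ofList s

-- ===== PRECONDITION & SPEC =====
def Spec_solution (N : Int) (out : String) : Prop := out = solution_alt N
instance (N : Int) (out : String) : Decidable (Spec_solution N out) := by unfold Spec_solution; infer_instance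

-- ===== CLAIM (what is proved, stated in full; the proofs are below) =====
def Claim_equal_solution : Prop := ∀ (N : Int), Dom_solution N → Spec_solution N (solution N)

-- ===== LEMMAS AND PROOFS =====

-- the state of A's loop after k iterations
def loopL : Nat → List Char
  | 0 => []
  | k+1 => loopL k ++ [pvAlphabet.getD (k % 26) 'a', pvAlphabet.getD (k % 26) 'a']

theorem length_loopL (k : Nat) : (loopL k).length = 2 * k := by
  induction k with
  | zero => rfl
  | succ k ih => simp [loopL, ih]; omega

theorem loopL_add (a j : Nat) (h : 26 ∣ a) : loopL (a + j) = loopL a ++ loopL j := by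
  induction j with
  | zero => simp [loopL]
  | succ j ih =>
      have hm : (a + j) % 26 = j % 26 := by
        obtain ⟨t, rfl⟩ := h; omega
      show loopL ((a + j) + 1) = _
      rw [loopL, ih, hm]
      simp [loopL]

theorem loopL_mul (m : Nat) : loopL (26 * m) = (List.replicate m pvPeriod).flatten := by
  induction m with
  | zero => rfl
  | succ m ih =>
      have h26 : loopL 26 = pvPeriod := by decide
      have : 26 * (m + 1) = 26 * m + 26 := by ring
      rw [this, loopL_add _ _ ⟨m, rfl⟩, ih, h26, List.replicate_succ']
      simp

theorem take_loopL (k j : Nat) (h : k ≤ j) : (loopL j).take (2 * k) = loopL k := by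
  induction j with
  | zero => interval_cases k; rfl
  | succ j ih =>
      rcases Nat.lt_or_ge k (j + 1) with hk | hk
      · have hk' : k ≤ j := by omega
        rw [loopL, List.take_append_of_le_length (by rw [length_loopL]; omega), ih hk']
      · have : k = j + 1 := by omega
        subst this
        rw [List.take_of_length_le (by rw [length_loopL])]

theorem foldA (k : Nat) :
    (PySem.List.pyRange 0 (k : Int)).foldl
      (fun r i => r ++ PySem.List.pyRepeat [PySem.List.pyGetD pvAlphabet (PySem.Int.mod i 26) 'a'] 2) []
      = loopL k := by
  induction k with
  | zero => simp [PySem.List.pyRange_one_eq_nil (le_refl 0), loopL]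
  | succ k ih =>
      have hcast : ((k + 1 : Nat) : Int) = (k : Int) + 1 := by push_cast; ring
      rw [hcast, PySem.List.pyRange_one_succ_right (by positivity), List.foldl_append, ih]
      simp [PySem.List.pyRepeat_singleton, loopL, List.replicate]
      rw [show ((k : Int) % 26) = ((k % 26 : Nat) : Int) by push_cast; ring,
        PySem.List.pyGetD_natCast]
      simp [List.getD]

theorem solution_eq_alt (N : Int) : solution N = solution_alt N := by
  simp only [solution, solution_alt]
  rcases (by omega : PySem.Int.floordiv N 2 ≤ 0 ∨ 0 < PySem.Int.floordiv N 2) with hK | hK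
  · rw [PySem.List.pyRange_one_eq_nil hK]
    have hmax : max 0 (PySem.Int.floordiv N 2) = 0 := by omega
    rw [hmax]
    norm_num [PySem.List.slice_to _ (le_refl (0:Int))]
    simp [show PySem.List.pyGetD pvAlphabet 0 'a' = 'a' from by decide]
  · set K := PySem.Int.floordiv N 2 with hKdef
    have hk : K = ((K.toNat : Nat) : Int) := by omega
    set k := K.toNat with hkdef
    have hmax : max 0 K = K := by omega
    rw [hmax, hk, foldA]
    have h2k : (2 * ((k : Nat) : Int)) = ((2 * k : Nat) : Int) := by push_cast; ring
    rw [h2k, PySem.List.slice_to _ (by positivity)]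
    -- the repetition count
    set r := (PySem.Int.floordiv ((2 * k : Nat) : Int) 52 + 1).toNat with hrdef
    have hdiv : PySem.Int.floordiv ((2 * k : Nat) : Int) 52 = ((2 * k) / 52 : Nat) := by
      simp [PySem.Int.floordiv, Int.fdiv_eq_ediv]
    have hr : r = (2 * k) / 52 + 1 := by
      rw [hrdef, hdiv]; omega
    have hkr : k ≤ 26 * r := by
      have := Nat.div_add_mod (2 * k) 52
      omega
    have hflat : PySem.List.pyRepeat pvPeriod (PySem.Int.floordiv ((2 * k : Nat) : Int) 52 + 1)
        = loopL (26 * r) := by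
      rw [loopL_mul]
      simp [PySem.List.pyRepeat, hrdef]
    rw [hflat]
    have htoNat : ((2 * k : Nat) : Int).toNat = 2 * k := by omega
    rw [htoNat, take_loopL k (26 * r) hkr]
    simp [show PySem.List.pyGetD pvAlphabet 0 'a' = 'a' from by decide]

-- ===== VERDICT (by name: the statement is the Claim_ definition above) =====
theorem solution_spec : Claim_equal_solution := by
  intro N _
  unfold Spec_solution
  exact solution_eq_alt N
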